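-- pv_equiv track=rewrite | github.com/isaksamsten/numpydoc-lint | src/numpydoc_lint/check/_base.py | _before_directive
-- ===== SOURCE A (Python) =====
-- from typing import Generator, List
--
-- DIRECTIVES = ["versionadded", "versionchanged", "deprecated"]
--
-- def _before_directive(lines: List[str]) -> List[str]:
--     new_lines = []
--     for line in lines:
--         if any(f".. {directive}" in line for directive in DIRECTIVES):
--             return new_lines
--
--         if line.strip():
--             new_lines.append(line)
--
--     return new_lines
-- ===== SOURCE B (Python) =====
-- from typing import List
--
-- DIRECTIVES = ["versionadded", "versionchanged", "deprecated"]
--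
-- def _has_directive(line: str) -> bool:
--     return any(f".. {directive}" in line for directive in DIRECTIVES)
--
-- def _before_directive(lines: List[str]) -> List[str]:
--     cut = next((i for i, line in enumerate(lines) if _has_directive(line)), len(lines))
--     return [line for line in lines[:cut] if line.strip()]
-- ===== Notes on version B (the rewrite author's own statement) =====
-- stated objective: idiomatic
-- what changed: Replaces the fused loop (early return + conditional append) with two separate passes: first locate the cut index of the first directive line with next/enumerate, then filter blank lines out of the slice before it with a comprehension.
import Mathlib
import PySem

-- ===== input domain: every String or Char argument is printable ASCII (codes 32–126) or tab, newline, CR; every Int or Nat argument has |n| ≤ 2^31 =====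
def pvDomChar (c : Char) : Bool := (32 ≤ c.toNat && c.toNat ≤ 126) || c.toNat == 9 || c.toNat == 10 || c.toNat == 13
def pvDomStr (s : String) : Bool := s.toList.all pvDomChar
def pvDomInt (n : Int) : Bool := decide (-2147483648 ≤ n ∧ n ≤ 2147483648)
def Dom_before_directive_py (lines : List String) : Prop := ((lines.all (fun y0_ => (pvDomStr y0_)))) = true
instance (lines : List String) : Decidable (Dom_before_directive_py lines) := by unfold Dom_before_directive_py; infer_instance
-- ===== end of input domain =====

-- ===== PORT A =====
-- B changes only the decomposition: two passes (find cut index, then filter blanks) instead of A's fused loop; no speed claim.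
-- shared literal: the directive test 'any(f".. {d}" in line for d in DIRECTIVES)', identical in both Pythons
def pvHasDirective (line : String) : Bool :=
  ["versionadded", "versionchanged", "deprecated"].any
    (fun directive => PySem.Str.isIn (".. " ++ directive) line)

-- A's loop: accumulator new_lines, early return on a directive line, append non-blank lines
def pvGoA (acc : List String) : List String → List String
  | [] => acc
  | line :: rest =>
    if pvHasDirective line then acc
    else if PySem.Str.strip line != "" then pvGoA (acc ++ [line]) rest
    else pvGoA acc rest

def before_directive_py (lines : List String) : List String :=
  pvGoA [] lines

-- ===== PORT B =====
-- next((i for i, line in enumerate(lines) if _has_directive(line)), len(lines)) = List.findIdx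
-- (List.findIdx returns lines.length when no element matches, exactly the default len(lines));
-- [line for line in lines[:cut] if line.strip()] = (lines.take cut).filter …
def before_directive_py_alt (lines : List String) : List String :=
  let cut := lines.findIdx pvHasDirective
  (lines.take cut).filter (fun line => PySem.Str.strip line != "")
-- ===== PRECONDITION & SPEC =====
def Spec_before_directive_py (lines : List String) (out : List String) : Prop := out = before_directive_py_alt lines
instance (lines : List String) (out : List String) : Decidable (Spec_before_directive_py lines out) := by unfold Spec_before_directive_py; infer_instance

-- ===== CLAIM (what is proved, stated in full; the proofs are below) =====
def Claim_equal_before_directive_py : Prop := ∀ (lines : List String), Dom_before_directive_py lines → Spec_before_directive_py lines (before_directive_py lines)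

-- ===== LEMMAS AND PROOFS =====

lemma pvGoA_eq (lines : List String) (acc : List String) :
    pvGoA acc lines = acc ++ before_directive_py_alt lines := by
  induction lines generalizing acc with
  | nil => simp [pvGoA, before_directive_py_alt]
  | cons line rest ih =>
    by_cases h : pvHasDirective line = true
    · simp [pvGoA, before_directive_py_alt, h, List.findIdx_cons]
    · simp only [Bool.not_eq_true] at h
      by_cases hs : (PySem.Str.strip line != "") = true
      · simp [pvGoA, before_directive_py_alt, h, hs, List.findIdx_cons, List.filter_cons, ih]
      · simp only [Bool.not_eq_true] at hs
        simp [pvGoA, before_directive_py_alt, h, hs, List.findIdx_cons, ih]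

-- ===== VERDICT (by name: the statement is the Claim_ definition above) =====
theorem before_directive_py_spec : Claim_equal_before_directive_py := by
  intro lines _
  unfold Spec_before_directive_py before_directive_py
  simpa using pvGoA_eq lines []
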